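-- pv_equiv track=rewrite | github.com/Enjef/Algo | 2300 - 2399/2373 - Largest Local Values in a Matrix/2373 - Largest Local Values in a Matrix.py | largestLocal_1st
-- ===== SOURCE A (Python) =====
-- from typing import List
--
-- def largestLocal_1st(grid: List[List[int]]) -> List[List[int]]:
--     N = len(grid)
--     ver_L = []
--     out = []
--     for _ in range(N-2):
--         ver_L.append([])
--         out.append([])
--     for j in range(N):
--         for i in range(N-2):
--             ver_L[i].append(max(grid[j][i], grid[j][i+1], grid[j][i+2]))
--     for L in ver_L:
--         for i in range(len(L)-2):
--             out[i].append(max(L[i], L[i+1], L[i+2]))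
--     return out
-- ===== SOURCE B (Python) =====
-- from typing import List
--
-- def largestLocal_1st(grid: List[List[int]]) -> List[List[int]]:
--     n = len(grid)
--     return [[max(grid[r][c], grid[r][c+1], grid[r][c+2],
--                  grid[r+1][c], grid[r+1][c+1], grid[r+1][c+2],
--                  grid[r+2][c], grid[r+2][c+1], grid[r+2][c+2])
--              for c in range(n-2)]
--             for r in range(n-2)]
-- ===== Notes on version B (the rewrite author's own statement) =====
-- stated objective: simpler
-- what changed: A builds an intermediate table of horizontal 3-window maxima and then runs a second, differently-shaped vertical pass over it; B is a direct nested comprehension that reduces each 3x3 block to its max in one pass, with no intermediate table.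
import Mathlib
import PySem

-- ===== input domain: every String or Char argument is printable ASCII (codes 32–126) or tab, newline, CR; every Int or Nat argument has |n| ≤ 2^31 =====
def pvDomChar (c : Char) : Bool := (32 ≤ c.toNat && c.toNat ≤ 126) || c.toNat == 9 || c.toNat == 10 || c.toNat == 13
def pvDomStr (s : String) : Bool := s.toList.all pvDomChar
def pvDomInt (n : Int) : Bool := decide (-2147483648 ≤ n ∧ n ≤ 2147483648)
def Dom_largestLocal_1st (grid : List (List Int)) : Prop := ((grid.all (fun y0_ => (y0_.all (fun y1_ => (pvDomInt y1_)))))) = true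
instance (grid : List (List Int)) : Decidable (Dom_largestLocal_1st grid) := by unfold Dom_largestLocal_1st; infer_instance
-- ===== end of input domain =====

-- B replaces A's intermediate horizontal-max table and second vertical pass by a direct
-- nested comprehension taking the max of each 3x3 block in one pass (objective: simpler).

-- ===== PORT A =====
-- grid[j][i] (in range on every Pre_ input; the default is never reached there)
def pvCell (grid : List (List Int)) (j i : Nat) : Int := (grid.getD j []).getD i 0

def largestLocal_1st (grid : List (List Int)) : List (List Int) :=
  let N := grid.length
  -- for _ in range(N-2): ver_L.append([]); out.append([])
  let verL0 : List (List Int) := (List.range (N - 2)).foldl (fun acc _ => acc ++ [[]]) []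
  let out0  : List (List Int) := (List.range (N - 2)).foldl (fun acc _ => acc ++ [[]]) []
  -- for j in range(N): for i in range(N-2): ver_L[i].append(max(grid[j][i], grid[j][i+1], grid[j][i+2]))
  let verL : List (List Int) := (List.range N).foldl (fun vL j =>
      (List.range (N - 2)).foldl (fun vL i =>
        vL.modify i (fun x => x ++ [max (max (pvCell grid j i) (pvCell grid j (i+1))) (pvCell grid j (i+2))])) vL) verL0
  -- for L in ver_L: for i in range(len(L)-2): out[i].append(max(L[i], L[i+1], L[i+2]))
  verL.foldl (fun out L =>
      (List.range (L.length - 2)).foldl (fun out i =>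
        out.modify i (fun x => x ++ [max (max (L.getD i 0) (L.getD (i+1) 0)) (L.getD (i+2) 0)])) out) out0

-- ===== PORT B =====
def largestLocal_1st_alt (grid : List (List Int)) : List (List Int) :=
  let n := grid.length
  (List.range (n - 2)).map (fun r =>
    (List.range (n - 2)).map (fun c =>
      max (max (max (max (max (max (max (max
        (pvCell grid r c) (pvCell grid r (c+1))) (pvCell grid r (c+2)))
        (pvCell grid (r+1) c)) (pvCell grid (r+1) (c+1))) (pvCell grid (r+1) (c+2)))
        (pvCell grid (r+2) c)) (pvCell grid (r+2) (c+1))) (pvCell grid (r+2) (c+2))))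

-- ===== PRECONDITION & SPEC =====
-- Pre_ excludes exactly the inputs where Python A raises IndexError: when len(grid) ≥ 3,
-- A reads columns 0..len(grid)-1 of every row, so every row needs at least len(grid) entries.
def Pre_largestLocal_1st (grid : List (List Int)) : Prop :=
  grid.length ≤ 2 ∨ ∀ row ∈ grid, grid.length ≤ row.length
instance (grid : List (List Int)) : Decidable (Pre_largestLocal_1st grid) := by
  unfold Pre_largestLocal_1st; infer_instance
def pvWitness_largestLocal_1st : List (List Int) := [[1,2,3],[4,5,6],[7,8,9]]

def Spec_largestLocal_1st (grid : List (List Int)) (out : List (List Int)) : Prop := out = largestLocal_1st_alt grid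
instance (grid : List (List Int)) (out : List (List Int)) : Decidable (Spec_largestLocal_1st grid out) := by unfold Spec_largestLocal_1st; infer_instance

-- ===== CLAIM (what is proved, stated in full; the proofs are below) =====
def Claim_equal_largestLocal_1st : Prop := ∀ (grid : List (List Int)), Dom_largestLocal_1st grid → Pre_largestLocal_1st grid → Spec_largestLocal_1st grid (largestLocal_1st grid)

-- ===== LEMMAS AND PROOFS =====

-- the []-append builder produces a replicate
lemma pvBuild (n : Nat) :
    (List.range n).foldl (fun acc _ => acc ++ [([] : List Int)]) []
      = List.replicate n [] := by
  induction n with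
  | zero => rfl
  | succ k ih =>
      rw [List.range_succ, List.foldl_append, ih, List.replicate_succ']
      rfl

-- one inner pass 'for i in range(m): acc[i].append(f i)', element-wise
lemma pvPass (f : Nat → Int) (L : List (List Int)) (m : Nat) (t : Nat) :
    ((List.range m).foldl (fun acc i => acc.modify i (fun x => x ++ [f i])) L)[t]?
      = if t < m then L[t]?.map (fun x => x ++ [f t]) else L[t]? := by
  induction m with
  | zero => simp
  | succ k ih =>
      rw [List.range_succ, List.foldl_append]
      simp only [List.foldl_cons, List.foldl_nil]
      rw [List.getElem?_modify, ih]
      rcases Nat.lt_trichotomy t k with h | h | h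
      · have h1 : t < k + 1 := by omega
        have h2 : k ≠ t := by omega
        cases L[t]? <;> simp [h, h1, h2]
      · subst h
        have h1 : t < t + 1 := by omega
        cases L[t]? <;> simp [h1]
      · have h1 : ¬ t < k := by omega
        have h2 : ¬ t < k + 1 := by omega
        have h3 : k ≠ t := by omega
        cases L[t]? <;> simp [h1, h2, h3]

-- the same pass started from a map-of-range accumulator
lemma pvOutPass (f : Nat → Int) (F : Nat → List Int) (m : Nat) :
    (List.range m).foldl (fun acc i => acc.modify i (fun x => x ++ [f i]))
        ((List.range m).map F)
      = (List.range m).map (fun i => F i ++ [f i]) := by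
  apply List.ext_getElem?
  intro t
  rw [pvPass]
  by_cases ht : t < m
  · simp [ht]
  · have h : m ≤ t := Nat.le_of_not_lt ht
    rw [List.getElem?_eq_none (by simpa using h), List.getElem?_eq_none (by simpa using h)]
    simp [ht]

-- the generic double loop 'for c in range(K): for i in range(m): out[i].append(v c i)'
-- builds the transposed table [[v c r for c in range(K)] for r in range(m)]
lemma pvLoop (v : Nat → Nat → Int) (m K : Nat) :
    (List.range K).foldl (fun out c =>
        (List.range m).foldl (fun out i => out.modify i (fun x => x ++ [v c i])) out)
      (List.replicate m []) =
    (List.range m).map (fun r => (List.range K).map (fun c => v c r)) := by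
  induction K with
  | zero =>
      simp [List.map_const']
  | succ K ih =>
      rw [List.range_succ, List.foldl_append]
      simp only [List.foldl_cons, List.foldl_nil, ih]
      rw [pvOutPass]
      apply List.map_congr_left
      intro r _
      rw [List.map_append]
      rfl

-- getD on a map-of-range at an in-range index
lemma pvGetDmap (F : Nat → Int) (N j : Nat) (hj : j < N) :
    ((List.range N).map F).getD j 0 = F j := by
  rw [List.getD_eq_getElem?_getD]
  simp [hj]

-- ===== VERDICT (by name: the statement is the Claim_ definition above) =====
theorem largestLocal_1st_spec : Claim_equal_largestLocal_1st := by
  intro grid _ _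
  unfold Spec_largestLocal_1st largestLocal_1st largestLocal_1st_alt
  simp only [pvBuild]
  rw [pvLoop (fun j i => max (max (pvCell grid j i) (pvCell grid j (i+1))) (pvCell grid j (i+2)))
        (grid.length - 2) grid.length]
  rw [List.foldl_map]
  simp only [List.length_map, List.length_range]
  rw [pvLoop (fun c i =>
        max (max (((List.range grid.length).map (fun j =>
              max (max (pvCell grid j c) (pvCell grid j (c+1))) (pvCell grid j (c+2)))).getD i 0)
            (((List.range grid.length).map (fun j =>
              max (max (pvCell grid j c) (pvCell grid j (c+1))) (pvCell grid j (c+2)))).getD (i+1) 0))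
          (((List.range grid.length).map (fun j =>
              max (max (pvCell grid j c) (pvCell grid j (c+1))) (pvCell grid j (c+2)))).getD (i+2) 0))
      (grid.length - 2) (grid.length - 2)]
  apply List.map_congr_left
  intro r hr
  apply List.map_congr_left
  intro c _
  have hrm : r < grid.length - 2 := List.mem_range.mp hr
  rw [pvGetDmap _ _ _ (by omega : r < grid.length),
      pvGetDmap _ _ _ (by omega : r + 1 < grid.length),
      pvGetDmap _ _ _ (by omega : r + 2 < grid.length)]
  simp only [max_assoc]
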